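-- pv_equiv track=rewrite | github.com/NaayoungKwon/AlgorithmStudy | 백준/Silver/2785. 체인/체인.py | solution
-- ===== SOURCE A (Python) =====
-- import collections
--
-- def solution(n, temp):
--     temp.sort()
--     arr = collections.deque()
--     for e in temp:
--         arr.append(e)
--     result = 0
--
--     while len(arr) > 1:
--         if arr[0] == 0:
--             arr.popleft()
--             continue
--         arr[0] -= 1
--         arr[-2] += (arr[-1] +1)
--         arr.pop()
--         result += 1
--     return result #+ (1 if len(arr) > 0 else 0)
-- ===== SOURCE B (Python) =====
-- def solution(n, temp):
--     temp.sort()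
--     if len(temp) < 2:
--         return 0
--     L, R = 0, len(temp) - 1
--     health = temp[0]
--     result = 0
--     while L < R:
--         if health == 0:
--             L += 1
--             health = temp[L]
--         else:
--             health -= 1
--             R -= 1
--             result += 1
--     return result
-- ===== Notes on version B (the rewrite author's own statement) =====
-- stated objective: simpler
-- what changed: Replaces the deque simulation that mutates elements and accumulates an irrelevant sum into the tail with two index pointers over the sorted list plus a single 'health' counter for the current head; no element values are ever modified.
import Mathlib
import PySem

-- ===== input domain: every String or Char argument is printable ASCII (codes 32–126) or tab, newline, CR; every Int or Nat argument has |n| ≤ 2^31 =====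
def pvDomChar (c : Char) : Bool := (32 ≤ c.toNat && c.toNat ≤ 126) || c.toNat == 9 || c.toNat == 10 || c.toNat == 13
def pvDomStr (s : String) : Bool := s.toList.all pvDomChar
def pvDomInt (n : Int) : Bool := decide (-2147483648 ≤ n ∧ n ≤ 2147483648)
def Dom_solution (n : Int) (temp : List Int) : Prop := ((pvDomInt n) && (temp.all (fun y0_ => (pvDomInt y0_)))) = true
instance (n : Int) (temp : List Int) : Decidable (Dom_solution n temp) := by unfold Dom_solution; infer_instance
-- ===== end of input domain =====

-- B replaces A's deque simulation (which mutates element values and accumulates a sum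
-- into the tail) by a two-pointer scan with a single 'health' counter; simpler, same
-- return value. Side effects: both A and B sort temp in place; the equivalence proved
-- here is about the return value.

-- ===== PORT A =====
-- A's while loop: every iteration shortens the deque by one (popleft or pop),
-- so the list length is the loop measure
def solution_aLoop : List Int → Int → Int
  | [], r => r
  | [_], r => r
  | x :: y :: rest, r =>
    if x == 0 then solution_aLoop (y :: rest) r
    else
      -- arr[0] -= 1; arr[-2] += arr[-1] + 1; arr.pop(); result += 1
      solution_aLoop
        ((((x - 1) :: y :: rest).dropLast).dropLast ++
          [(((x - 1) :: y :: rest).dropLast).getLastD 0 +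
            (((x - 1) :: y :: rest).getLastD 0 + 1)]) (r + 1)
  termination_by arr _ => arr.length
  decreasing_by all_goals simp_all [List.length_dropLast]

def solution (n : Int) (temp : List Int) : Int :=
  solution_aLoop (PySem.List.sorted temp (fun x => x) false) 0

-- ===== PORT B =====
-- B's while loop: L advances or R retreats, measure R - L
def solution_bLoop (s : List Int) (L R : Nat) (health r : Int) : Int :=
  if _h : L < R then
    if health == 0 then solution_bLoop s (L + 1) R (s.getD (L + 1) 0) r
    else solution_bLoop s L (R - 1) (health - 1) (r + 1)
  else r
  termination_by R - L
  decreasing_by all_goals omega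

def solution_alt (n : Int) (temp : List Int) : Int :=
  let s := PySem.List.sorted temp (fun x => x) false
  if s.length < 2 then 0
  else solution_bLoop s 0 (s.length - 1) (s.getD 0 0) 0

-- ===== PRECONDITION & SPEC =====
def Spec_solution (n : Int) (temp : List Int) (out : Int) : Prop := out = solution_alt n temp
instance (n : Int) (temp : List Int) (out : Int) : Decidable (Spec_solution n temp out) := by unfold Spec_solution; infer_instance

-- ===== CLAIM (what is proved, stated in full; the proofs are below) =====
def Claim_equal_solution : Prop := ∀ (n : Int) (temp : List Int), Dom_solution n temp → Spec_solution n temp (solution n temp)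

-- ===== LEMMAS AND PROOFS =====

-- intermediate model: A's loop with the tail accumulation dropped
def solution_mLoop : List Int → Int → Int
  | [], r => r
  | [_], r => r
  | x :: y :: rest, r =>
    if x == 0 then solution_mLoop (y :: rest) r
    else solution_mLoop ((x - 1) :: (y :: rest).dropLast) (r + 1)
  termination_by arr _ => arr.length
  decreasing_by all_goals simp_all [List.length_dropLast]

-- unfolding lemmas with Prop-valued conditions
theorem solution_aLoop_nil (r : Int) : solution_aLoop [] r = r := by
  simp [solution_aLoop]

theorem solution_aLoop_single (x r : Int) : solution_aLoop [x] r = r := by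
  simp [solution_aLoop]

theorem solution_aLoop_cons_cons (x y : Int) (rest : List Int) (r : Int) :
    solution_aLoop (x :: y :: rest) r =
      if x = 0 then solution_aLoop (y :: rest) r
      else solution_aLoop
        ((((x - 1) :: y :: rest).dropLast).dropLast ++
          [(((x - 1) :: y :: rest).dropLast).getLastD 0 +
            (((x - 1) :: y :: rest).getLastD 0 + 1)]) (r + 1) := by
  rw [solution_aLoop]
  by_cases hx : x = 0 <;> simp [hx]

theorem solution_mLoop_nil (r : Int) : solution_mLoop [] r = r := by
  simp [solution_mLoop]

theorem solution_mLoop_single (x r : Int) : solution_mLoop [x] r = r := by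
  simp [solution_mLoop]

theorem solution_mLoop_cons_cons (x y : Int) (rest : List Int) (r : Int) :
    solution_mLoop (x :: y :: rest) r =
      if x = 0 then solution_mLoop (y :: rest) r
      else solution_mLoop ((x - 1) :: (y :: rest).dropLast) (r + 1) := by
  rw [solution_mLoop]
  by_cases hx : x = 0 <;> simp [hx]

theorem solution_bLoop_stop (s : List Int) (L R : Nat) (x r : Int) (h : ¬ L < R) :
    solution_bLoop s L R x r = r := by
  rw [solution_bLoop]; simp [h]

theorem solution_bLoop_step (s : List Int) (L R : Nat) (x r : Int) (h : L < R) :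
    solution_bLoop s L R x r =
      if x = 0 then solution_bLoop s (L + 1) R (s.getD (L + 1) 0) r
      else solution_bLoop s L (R - 1) (x - 1) (r + 1) := by
  rw [solution_bLoop]
  by_cases hx : x = 0 <;> simp [h, hx]

-- the value of the last element never influences A's loop result (nonempty prefix)
theorem solution_lastIrrel : ∀ (k : Nat) (l : List Int), l.length ≤ k → l ≠ [] →
    ∀ (a b r : Int), solution_aLoop (l ++ [a]) r = solution_aLoop (l ++ [b]) r := by
  intro k
  induction k with
  | zero => intro l hl hne; cases l <;> simp_all
  | succ k ih =>
    intro l hl hne a b r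
    match l with
    | [z] =>
      by_cases hz : z = 0 <;>
        simp [solution_aLoop_cons_cons, solution_aLoop_nil, solution_aLoop_single, hz,
          List.dropLast_concat, List.getLastD_concat]
    | z :: w :: m =>
      have hl' : (w :: m).length ≤ k := by simp at hl ⊢; omega
      by_cases hz : z = 0
      · simp only [List.cons_append, solution_aLoop_cons_cons, hz, if_true, if_pos]
        exact ih (w :: m) hl' (by simp) a b r
      · simp only [List.cons_append, solution_aLoop_cons_cons, if_neg hz]
        rw [show ((z - 1 : Int) :: w :: (m ++ [a])) = ((z - 1) :: w :: m) ++ [a] by simp,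
            show ((z - 1 : Int) :: w :: (m ++ [b])) = ((z - 1) :: w :: m) ++ [b] by simp,
            List.dropLast_concat, List.dropLast_concat,
            List.getLastD_concat, List.getLastD_concat]
        have hlen : (((z - 1 : Int) :: w :: m).dropLast).length ≤ k := by
          simp at hl ⊢; omega
        exact ih (((z - 1) :: w :: m).dropLast) hlen (by simp) _ _ (r + 1)

-- A's loop equals the accumulation-free model
theorem solution_aLoop_eq_mLoop : ∀ (k : Nat) (s : List Int), s.length ≤ k →
    ∀ r, solution_aLoop s r = solution_mLoop s r := by
  intro k
  induction k with
  | zero =>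
    intro s hs r
    cases s <;> simp_all [solution_aLoop_nil, solution_mLoop_nil]
  | succ k ih =>
    intro s hs r
    match s with
    | [] => rw [solution_aLoop_nil, solution_mLoop_nil]
    | [x] => rw [solution_aLoop_single, solution_mLoop_single]
    | x :: y :: rest =>
      rw [solution_aLoop_cons_cons, solution_mLoop_cons_cons]
      by_cases hx : x = 0
      · rw [if_pos hx, if_pos hx]
        exact ih (y :: rest) (by simp at hs ⊢; omega) r
      · rw [if_neg hx, if_neg hx]
        match rest with
        | [] =>
          simp [solution_aLoop_single, solution_mLoop_single]
        | w :: m =>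
          have hmk : m.length + 3 ≤ k + 1 := by simpa using hs
          set P : List Int := (x - 1) :: (y :: w :: m).dropLast with hP
          have hPne : P ≠ [] := by simp [hP]
          have hPlen : P.length = m.length + 2 := by simp [hP]
          have hdrop : ((x - 1 : Int) :: y :: w :: m).dropLast = P := by simp [hP]
          rw [hdrop]
          have hPsplit : P = P.dropLast ++ [P.getLast hPne] :=
            (List.dropLast_append_getLast hPne).symm
          have hdne : P.dropLast ≠ [] := by simp [hP]
          have hdlen : P.dropLast.length ≤ k := by
            rw [List.length_dropLast, hPlen]; omega
          calc solution_aLoop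
                (P.dropLast ++ [P.getLastD 0 + (((x - 1) :: y :: w :: m).getLastD 0 + 1)])
                (r + 1)
              = solution_aLoop (P.dropLast ++ [P.getLast hPne]) (r + 1) :=
                solution_lastIrrel k P.dropLast hdlen hdne _ _ (r + 1)
            _ = solution_aLoop P (r + 1) := by rw [← hPsplit]
            _ = solution_mLoop P (r + 1) := ih P (by omega) (r + 1)

-- (take n l).dropLast = take (n-1) l when n ≤ length
theorem solution_dropLast_take (n : Nat) (l : List Int) (h : n ≤ l.length) :
    (l.take n).dropLast = l.take (n - 1) := by
  apply List.ext_getElem <;> simp [List.length_take] <;> omega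

-- B's loop equals the model on the window health :: s[L+1 .. R]
theorem solution_bLoop_eq_mLoop : ∀ (k : Nat) (s : List Int) (L R : Nat),
    R - L ≤ k → L ≤ R → R < s.length → ∀ (x r : Int),
    solution_bLoop s L R x r = solution_mLoop (x :: (s.drop (L + 1)).take (R - L)) r := by
  intro k
  induction k with
  | zero =>
    intro s L R hk hLR hR x r
    have h : L = R := by omega
    subst h
    rw [solution_bLoop_stop _ _ _ _ _ (by omega)]
    simp [solution_mLoop_single]
  | succ k ih =>
    intro s L R hk hLR hR x r
    by_cases h : L < R
    · have hL1 : L + 1 < s.length := by omega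
      have hdropcons : s.drop (L + 1) = s[L + 1] :: s.drop (L + 2) :=
        List.drop_eq_getElem_cons hL1
      have hseg : (s.drop (L + 1)).take (R - L) =
          s[L + 1] :: (s.drop (L + 2)).take (R - (L + 1)) := by
        rw [hdropcons, show R - L = (R - (L + 1)) + 1 by omega, List.take_succ_cons]
      have hgetD : s.getD (L + 1) 0 = s[L + 1] := by
        rw [List.getD_eq_getElem?_getD, List.getElem?_eq_getElem hL1]; rfl
      rw [solution_bLoop_step _ _ _ _ _ h, hseg, solution_mLoop_cons_cons]
      by_cases hx : x = 0
      · rw [if_pos hx, if_pos hx,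
            ih s (L + 1) R (by omega) (by omega) hR (s.getD (L + 1) 0) r, hgetD]
      · rw [if_neg hx, if_neg hx,
            ih s L (R - 1) (by omega) (by omega) (by omega) (x - 1) (r + 1)]
        congr 1
        rw [hseg.symm, solution_dropLast_take (R - L) (s.drop (L + 1)) (by simp; omega),
            show R - L - 1 = R - 1 - L by omega]
    · have h' : L = R := by omega
      subst h'
      rw [solution_bLoop_stop _ _ _ _ _ (by omega)]
      simp [solution_mLoop_single]

-- ===== VERDICT (by name: the statement is the Claim_ definition above) =====
theorem solution_spec : Claim_equal_solution := by
  intro n temp _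
  unfold Spec_solution solution solution_alt
  set s := PySem.List.sorted temp (fun x => x) false with hs
  by_cases hlen : s.length < 2
  · match s, hlen with
    | [], _ => simp [solution_aLoop_nil]
    | [x], _ => simp [solution_aLoop_single]
    | x :: y :: rest, hlen => simp at hlen
  · match s, hlen with
    | x :: t, hlen =>
      simp only [if_neg hlen]
      have hlen' : 1 ≤ t.length := by simp only [List.length_cons] at hlen; omega
      rw [solution_aLoop_eq_mLoop (x :: t).length _ le_rfl 0,
          solution_bLoop_eq_mLoop ((x :: t).length - 1) (x :: t) 0
            ((x :: t).length - 1) le_rfl (by omega) (by simp) _ 0]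
      have h1 : ((x :: t).drop 1).take ((x :: t).length - 1 - 0) = t := by simp
      have h2 : (x :: t).getD 0 0 = x := rfl
      rw [h1, h2]
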